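-- pv_equiv track=rewrite | github.com/shanlihou/pythonFunc | CreateRankDungeon/Cards.py | getCouldUseDoor
-- ===== SOURCE A (Python) =====
-- def getCouldUseDoor(useDict, fDoor, bDoor, useDoor):
--     retList = []
--     for fIndex, fd in enumerate(fDoor):
--         if not fd:
--             continue
--
--         if fIndex == useDoor:
--             continue
--
--         if fIndex in useDict:
--             bList = useDict[fIndex]
--             for bIndex, bd in enumerate(bDoor):
--                 if not bd:
--                     continue
--
--                 if bIndex in bList:
--                     continue
--
--                 retList.append(fIndex)
--                 break
--         else:
--             retList.append(fIndex)
--     return retList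
-- ===== SOURCE B (Python) =====
-- def getCouldUseDoor(useDict, fDoor, bDoor, useDoor):
--     # Pass 1: iterate back doors on the OUTSIDE; for each truthy back door,
--     # mark every keyed front door whose used-list misses it as satisfied.
--     satisfied = set()
--     for bIndex, bd in enumerate(bDoor):
--         if bd:
--             for fIndex, bList in useDict.items():
--                 if bIndex not in bList:
--                     satisfied.add(fIndex)
--     # Pass 2: collect truthy front doors (other than useDoor) that are either
--     # unkeyed or were marked satisfied.
--     return [f for f, fd in enumerate(fDoor)
--             if fd and f != useDoor and (f not in useDict or f in satisfied)]
-- ===== Notes on version B (the rewrite author's own statement) =====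
-- stated objective: alternative
-- what changed: Inverts the loop nesting: instead of scanning bDoor with a break inside each front-door iteration, B makes one pass with back doors on the outside that marks keyed front doors having an unused truthy back door into a 'satisfied' set, then a second pass filters fDoor by membership in that set.
import Mathlib
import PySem

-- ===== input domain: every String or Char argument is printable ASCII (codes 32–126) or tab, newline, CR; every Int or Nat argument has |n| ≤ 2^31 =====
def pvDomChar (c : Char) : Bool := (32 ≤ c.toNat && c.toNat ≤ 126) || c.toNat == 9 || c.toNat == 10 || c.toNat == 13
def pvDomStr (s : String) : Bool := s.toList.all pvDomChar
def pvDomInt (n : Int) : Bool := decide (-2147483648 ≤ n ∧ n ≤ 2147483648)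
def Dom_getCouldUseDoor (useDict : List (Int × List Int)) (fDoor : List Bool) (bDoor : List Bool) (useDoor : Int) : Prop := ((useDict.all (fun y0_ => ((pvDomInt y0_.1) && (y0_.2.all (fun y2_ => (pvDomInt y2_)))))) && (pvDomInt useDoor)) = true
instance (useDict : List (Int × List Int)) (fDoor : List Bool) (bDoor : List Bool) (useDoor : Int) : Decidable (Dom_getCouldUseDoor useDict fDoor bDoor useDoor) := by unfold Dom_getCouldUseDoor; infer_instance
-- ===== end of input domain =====

-- B inverts the loop nesting: one pass with back doors on the outside marks keyed front
-- doors that have an unused truthy back door into a set; a second pass filters fDoor by it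
-- (objective: alternative structure, same cost class).

-- ===== PORT A =====
-- inner 'for bIndex, bd in enumerate(bDoor): … break' loop: true iff the break is reached
def pvInnerA (bList : List Int) : List (Int × Bool) → Bool
  | [] => false
  | (bIndex, bd) :: rest =>
      if !bd then pvInnerA bList rest
      else if bList.contains bIndex then pvInnerA bList rest
      else true

def getCouldUseDoor (useDict : List (Int × List Int)) (fDoor : List Bool) (bDoor : List Bool) (useDoor : Int) : List Int :=
  (PySem.List.enumerate fDoor).foldl (fun retList p =>
    if !p.2 then retList
    else if p.1 = useDoor then retList
    else match (PySem.Dict.mk useDict).get? p.1 with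
      | some bList =>
          if pvInnerA bList (PySem.List.enumerate bDoor) then retList ++ [p.1] else retList
      | none => retList ++ [p.1]) []

-- ===== PORT B =====
def getCouldUseDoor_alt (useDict : List (Int × List Int)) (fDoor : List Bool) (bDoor : List Bool) (useDoor : Int) : List Int :=
  let d := PySem.Dict.mk useDict
  -- pass 1: back doors outer, dict items inner, marking satisfied keyed fronts
  let satisfied : PySem.Set Int :=
    (PySem.List.enumerate bDoor).foldl (fun s p =>
      if p.2 then
        d.items.foldl (fun s q =>
          if !q.2.contains p.1 then PySem.Set.add s q.1 else s) s
      else s) PySem.Set.empty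
  -- pass 2: filter front doors
  ((PySem.List.enumerate fDoor).filter (fun p =>
      p.2 && p.1 != useDoor && (!(d.contains p.1) || PySem.Set.contains satisfied p.1))).map (·.1)

-- ===== PRECONDITION & SPEC =====
-- A real Python dict argument always maps to an association list with distinct keys, so
-- Pre_ excludes only Lean-side lists with duplicate keys, which no Python input produces.
def Pre_getCouldUseDoor (useDict : List (Int × List Int)) (fDoor : List Bool) (bDoor : List Bool) (useDoor : Int) : Prop :=
  (useDict.map Prod.fst).Nodup
instance (useDict : List (Int × List Int)) (fDoor : List Bool) (bDoor : List Bool) (useDoor : Int) : Decidable (Pre_getCouldUseDoor useDict fDoor bDoor useDoor) := by unfold Pre_getCouldUseDoor; infer_instance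
def pvWitness_getCouldUseDoor : (List (Int × List Int)) × List Bool × List Bool × Int :=
  ([(0, [1])], [true, true], [true, false], 0)
def Spec_getCouldUseDoor (useDict : List (Int × List Int)) (fDoor : List Bool) (bDoor : List Bool) (useDoor : Int) (out : List Int) : Prop := out = getCouldUseDoor_alt useDict fDoor bDoor useDoor
instance (useDict : List (Int × List Int)) (fDoor : List Bool) (bDoor : List Bool) (useDoor : Int) (out : List Int) : Decidable (Spec_getCouldUseDoor useDict fDoor bDoor useDoor out) := by unfold Spec_getCouldUseDoor; infer_instance

-- ===== CLAIM (what is proved, stated in full; the proofs are below) =====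
def Claim_equal_getCouldUseDoor : Prop := ∀ (useDict : List (Int × List Int)) (fDoor : List Bool) (bDoor : List Bool) (useDoor : Int), Dom_getCouldUseDoor useDict fDoor bDoor useDoor → Pre_getCouldUseDoor useDict fDoor bDoor useDoor → Spec_getCouldUseDoor useDict fDoor bDoor useDoor (getCouldUseDoor useDict fDoor bDoor useDoor)

-- ===== LEMMAS AND PROOFS =====
-- A's per-front-door condition, named for the proofs
def pvCondA (useDict : List (Int × List Int)) (bDoor : List Bool) (useDoor : Int)
    (p : Int × Bool) : Bool :=
  p.2 && p.1 != useDoor &&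
  (match (PySem.Dict.mk useDict).get? p.1 with
   | none => true
   | some bl => pvInnerA bl (PySem.List.enumerate bDoor))

lemma pvInnerA_any (bList : List Int) (l : List (Int × Bool)) :
    pvInnerA bList l = l.any (fun p => p.2 && !bList.contains p.1) := by
  induction l with
  | nil => rfl
  | cons q rest ih =>
    obtain ⟨bIndex, bd⟩ := q
    simp only [pvInnerA, List.any_cons]
    cases bd <;> by_cases h : bList.contains bIndex <;> simp [ih]

-- membership in B's inner marking loop
lemma pvMem_inner_foldl (l : List (Int × List Int)) (c : Int × List Int → Bool)
    (s : PySem.Set Int) (y : Int) :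
    (y ∈ l.foldl (fun s q => if c q then PySem.Set.add s q.1 else s) s)
    ↔ y ∈ s ∨ ∃ q ∈ l, c q ∧ y = q.1 := by
  induction l generalizing s with
  | nil => simp
  | cons q rest ih =>
    simp only [List.foldl_cons]
    by_cases h : c q = true
    · rw [if_pos h, ih]
      simp only [PySem.Set.mem_add, List.mem_cons]
      constructor
      · rintro (⟨hy | hy⟩ | ⟨r, hr, hc, rfl⟩)
        · exact Or.inl hy
        · exact Or.inr ⟨q, Or.inl rfl, h, hy⟩
        · exact Or.inr ⟨r, Or.inr hr, hc, rfl⟩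
      · rintro (hy | ⟨r, (rfl | hr), hc, rfl⟩)
        · exact Or.inl (Or.inl hy)
        · exact Or.inl (Or.inr rfl)
        · exact Or.inr ⟨r, hr, hc, rfl⟩
    · rw [if_neg h, ih]
      apply or_congr_right
      constructor
      · rintro ⟨r, hr, hc, rfl⟩
        exact ⟨r, List.mem_cons_of_mem _ hr, hc, rfl⟩
      · rintro ⟨r, hr, hc, rfl⟩
        rcases List.mem_cons.mp hr with rfl | hr'
        · exact absurd hc h
        · exact ⟨r, hr', hc, rfl⟩

-- membership in B's whole first pass (generalized over the accumulator)
lemma pvMem_outer (useDict : List (Int × List Int)) (l : List (Int × Bool))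
    (s : PySem.Set Int) (y : Int) :
    (y ∈ l.foldl (fun s p =>
        if p.2 then
          (PySem.Dict.mk useDict).items.foldl (fun s q =>
            if !q.2.contains p.1 then PySem.Set.add s q.1 else s) s
        else s) s)
    ↔ y ∈ s ∨ ∃ p ∈ l, p.2 = true ∧
        ∃ q ∈ (PySem.Dict.mk useDict).items, !q.2.contains p.1 ∧ y = q.1 := by
  induction l generalizing s with
  | nil => simp
  | cons p rest ih =>
    simp only [List.foldl_cons]
    by_cases hp : p.2 = true
    · rw [if_pos hp, ih,
        pvMem_inner_foldl (PySem.Dict.mk useDict).items (fun q => !q.2.contains p.1)]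
      constructor
      · rintro ((hy | ⟨q, hq, hc, rfl⟩) | ⟨r, hr, hrd, q, hq, hc, rfl⟩)
        · exact Or.inl hy
        · exact Or.inr ⟨p, List.mem_cons_self, hp, q, hq, hc, rfl⟩
        · exact Or.inr ⟨r, List.mem_cons_of_mem _ hr, hrd, q, hq, hc, rfl⟩
      · rintro (hy | ⟨r, hr, hrd, q, hq, hc, rfl⟩)
        · exact Or.inl (Or.inl hy)
        · rcases List.mem_cons.mp hr with rfl | hr'
          · exact Or.inl (Or.inr ⟨q, hq, hc, rfl⟩)
          · exact Or.inr ⟨r, hr', hrd, q, hq, hc, rfl⟩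
    · rw [if_neg hp, ih]
      apply or_congr_right
      constructor
      · rintro ⟨r, hr, hrd, hrest⟩
        exact ⟨r, List.mem_cons_of_mem _ hr, hrd, hrest⟩
      · rintro ⟨r, hr, hrd, hrest⟩
        rcases List.mem_cons.mp hr with rfl | hr'
        · exact absurd hrd hp
        · exact ⟨r, hr', hrd, hrest⟩

-- the two per-front-door conditions agree
lemma pvCond_eq (useDict : List (Int × List Int)) (bDoor : List Bool) (useDoor : Int)
    (hnd : (PySem.Dict.mk useDict).keys.Nodup) (p : Int × Bool) :
    pvCondA useDict bDoor useDoor p =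
    (p.2 && p.1 != useDoor &&
      (!((PySem.Dict.mk useDict).contains p.1) ||
        PySem.Set.contains
          ((PySem.List.enumerate bDoor).foldl (fun s pb =>
            if pb.2 then
              (PySem.Dict.mk useDict).items.foldl (fun s q =>
                if !q.2.contains pb.1 then PySem.Set.add s q.1 else s) s
            else s) PySem.Set.empty) p.1)) := by
  unfold pvCondA
  congr 1
  cases hg : (PySem.Dict.mk useDict).get? p.1 with
  | none =>
    have hc : (PySem.Dict.mk useDict).contains p.1 = false := by
      rw [PySem.Dict.contains_eq_isSome_get? _ _, hg]; rfl
    simp [hc]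
  | some bl =>
    have hc : (PySem.Dict.mk useDict).contains p.1 = true := by
      rw [PySem.Dict.contains_eq_isSome_get? _ _, hg]; rfl
    rw [hc]
    simp only [Bool.not_true, Bool.false_or]
    rw [Bool.eq_iff_iff, pvInnerA_any, List.any_eq_true, PySem.Set.contains_iff]
    rw [show (PySem.Set.empty : PySem.Set Int) = ([] : List Int) from rfl]
    rw [pvMem_outer]
    constructor
    · rintro ⟨pb, hpb, hcond⟩
      rw [Bool.and_eq_true] at hcond
      exact Or.inr ⟨pb, hpb, hcond.1, (p.1, bl),
        PySem.Dict.mem_items_of_get?_eq_some _ hg, hcond.2, rfl⟩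
    · rintro (h | ⟨pb, hpb, hpd, q, hq, hcq, hyq⟩)
      · simp at h
      · obtain ⟨qk, qv⟩ := q
        have hyq' : p.1 = qk := hyq
        have hget : (PySem.Dict.mk useDict).get? qk = some qv :=
          PySem.Dict.get?_of_mem_items _ hq hnd
        rw [hyq'] at hg
        rw [hg] at hget
        have hbl : bl = qv := Option.some_inj.mp hget
        refine ⟨pb, hpb, ?_⟩
        rw [Bool.and_eq_true]
        exact ⟨hpd, by rw [hbl]; exact hcq⟩

lemma pvChain_eq (useDict : List (Int × List Int)) (bDoor : List Bool) (useDoor : Int)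
    (acc : List Int) (p : Int × Bool) :
    (if !p.2 then acc
     else if p.1 = useDoor then acc
     else match (PySem.Dict.mk useDict).get? p.1 with
       | some bList =>
           if pvInnerA bList (PySem.List.enumerate bDoor) then acc ++ [p.1] else acc
       | none => acc ++ [p.1])
    = (if pvCondA useDict bDoor useDoor p then acc ++ [p.1] else acc) := by
  cases hb : p.2 with
  | false => simp [pvCondA, hb]
  | true =>
    by_cases hu : p.1 = useDoor
    · simp [pvCondA, hb, hu]
    · unfold pvCondA
      cases hg : (PySem.Dict.mk useDict).get? p.1 with
      | none => simp [hb, hu]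
      | some bl =>
        cases hi : pvInnerA bl (PySem.List.enumerate bDoor) <;> simp [hb, hu, hi]

lemma pvFold_eq (useDict : List (Int × List Int)) (bDoor : List Bool) (useDoor : Int)
    (l : List (Int × Bool)) (acc : List Int) :
    l.foldl (fun retList p =>
      if !p.2 then retList
      else if p.1 = useDoor then retList
      else match (PySem.Dict.mk useDict).get? p.1 with
        | some bList =>
            if pvInnerA bList (PySem.List.enumerate bDoor) then retList ++ [p.1] else retList
        | none => retList ++ [p.1]) acc
    = acc ++ (l.filter (pvCondA useDict bDoor useDoor)).map (·.1) := by
  induction l generalizing acc with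
  | nil => simp
  | cons p rest ih =>
    rw [List.foldl_cons, pvChain_eq useDict bDoor useDoor acc p, List.filter_cons]
    by_cases hcond : pvCondA useDict bDoor useDoor p = true
    · rw [if_pos hcond, if_pos hcond, ih]; simp
    · rw [if_neg hcond, if_neg hcond, ih]

-- ===== VERDICT (by name: the statement is the Claim_ definition above) =====
theorem getCouldUseDoor_spec : Claim_equal_getCouldUseDoor := by
  intro useDict fDoor bDoor useDoor _ pre
  have hnd : (PySem.Dict.mk useDict).keys.Nodup := pre
  unfold Spec_getCouldUseDoor getCouldUseDoor getCouldUseDoor_alt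
  rw [pvFold_eq]
  simp only [List.nil_append]
  congr 1
  apply List.filter_congr
  intro p _
  exact pvCond_eq useDict bDoor useDoor hnd p
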